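-- pv_equiv track=rewrite | github.com/calebgunalan/mimikatzwebinterface | app.py | parse_credentials
-- ===== SOURCE A (Python) =====
-- def parse_credentials(output):
--     """Parse credential dump into structured data."""
--     creds = []
--     current_cred = {}
--     for line in output.splitlines():
--         if "Username" in line:
--             current_cred["username"] = line.split(":")[1].strip()
--         elif "Domain" in line:
--             current_cred["domain"] = line.split(":")[1].strip()
--         elif "Password" in line or "NTLM" in line:
--             current_cred["password"] = line.split(":")[1].strip() if ":" in line else "N/A"
--             creds.append(current_cred)
--             current_cred = {}
--     return {"credentials": creds} if creds else {"credentials": [{"username": "N/A", "domain": "N/A", "password": "No credentials found"}]}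
-- ===== SOURCE B (Python) =====
-- def parse_credentials(output):
--     """Parse credential dump into structured data.
--
--     Two-pass re-implementation: first cut the lines into groups, each closed by
--     a password/NTLM delimiter line; then build one dict per closed group, the
--     body giving username/domain and the delimiter line giving the password.
--     """
--     # pass 1: group lines; a delimiter line closes the current group
--     groups = []
--     cur = []
--     for line in output.splitlines():
--         cur.append(line)
--         if ("Password" in line or "NTLM" in line) and "Username" not in line and "Domain" not in line:
--             groups.append(cur)
--             cur = []
--     # trailing lines after the last delimiter never form a credential: dropped
--     # pass 2: one dict per group (last occurrence wins, insertion order kept)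
--     creds = []
--     for group in groups:
--         *body, delim = group
--         cred = {}
--         for line in body:
--             if "Username" in line:
--                 cred["username"] = line.split(":")[1].strip()
--             elif "Domain" in line:
--                 cred["domain"] = line.split(":")[1].strip()
--         cred["password"] = delim.split(":")[1].strip() if ":" in delim else "N/A"
--         creds.append(cred)
--     if creds:
--         return {"credentials": creds}
--     return {"credentials": [{"username": "N/A", "domain": "N/A", "password": "No credentials found"}]}
-- ===== Notes on version B (the rewrite author's own statement) =====
-- stated objective: alternative
-- what changed: Replaces A's single stateful scan (a running dict emitted and reset at each delimiter line) with a two-pass decomposition: pass one cuts the lines into groups each closed by a Password/NTLM delimiter line (trailing lines dropped), pass two destructures each group into body + delimiter, fills username/domain from the body and sets the password unconditionally from the delimiter line.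
import Mathlib
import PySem

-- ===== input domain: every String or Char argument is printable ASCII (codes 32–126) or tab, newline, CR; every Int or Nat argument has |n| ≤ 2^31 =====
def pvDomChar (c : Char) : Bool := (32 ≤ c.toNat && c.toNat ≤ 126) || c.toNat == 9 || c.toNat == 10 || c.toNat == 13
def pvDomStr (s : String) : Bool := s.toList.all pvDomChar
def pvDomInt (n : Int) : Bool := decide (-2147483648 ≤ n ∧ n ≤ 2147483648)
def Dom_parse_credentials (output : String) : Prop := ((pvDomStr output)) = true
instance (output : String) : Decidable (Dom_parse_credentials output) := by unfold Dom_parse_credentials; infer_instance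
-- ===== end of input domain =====

-- B re-implements the parser as two passes (group lines at delimiter lines, then build one dict per group from its body and its delimiter line) instead of A's single stateful scan; objective: alternative decomposition, same cost.


-- ===== PORT A =====
-- line.split(":")[1].strip(); the [1] is pyGet? with getD "" (Pre_ excludes the IndexError inputs)
def pvField (line : String) : String :=
  PySem.Str.strip ((PySem.List.pyGet? ((PySem.Str.split? line ":").getD []) 1).getD "")

-- A's loop body on state (creds, current_cred)
def pvStepA (st : List (PySem.Dict String String) × PySem.Dict String String) (line : String) :
    List (PySem.Dict String String) × PySem.Dict String String :=
  if PySem.Str.isIn "Username" line then (st.1, st.2.insert "username" (pvField line))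
  else if PySem.Str.isIn "Domain" line then (st.1, st.2.insert "domain" (pvField line))
  else if PySem.Str.isIn "Password" line || PySem.Str.isIn "NTLM" line then
    (st.1 ++ [st.2.insert "password" (if PySem.Str.isIn ":" line then pvField line else "N/A")],
     PySem.Dict.empty)
  else st

def pvFallback : List (List (String × String)) :=
  [[("username", "N/A"), ("domain", "N/A"), ("password", "No credentials found")]]

def parse_credentials (output : String) : List (String × List (List (String × String))) :=
  let r := (PySem.Str.splitlines output).foldl pvStepA ([], PySem.Dict.empty)
  if r.1 ≠ [] then [("credentials", r.1.map (·.items))] else [("credentials", pvFallback)]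

-- ===== PORT B =====
-- a delimiter line closes a group
def pvDelim (line : String) : Bool :=
  (PySem.Str.isIn "Password" line || PySem.Str.isIn "NTLM" line)
    && !PySem.Str.isIn "Username" line && !PySem.Str.isIn "Domain" line

-- pass-1 loop body: append line to the current group, close it on a delimiter
def pvStep1 (st : List (List String) × List String) (line : String) :
    List (List String) × List String :=
  let cur := st.2 ++ [line]
  if pvDelim line then (st.1 ++ [cur], []) else (st.1, cur)

-- pass-2 inner loop body: username/domain from a body line
def pvStepUD (d : PySem.Dict String String) (line : String) : PySem.Dict String String :=
  if PySem.Str.isIn "Username" line then d.insert "username" (pvField line)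
  else if PySem.Str.isIn "Domain" line then d.insert "domain" (pvField line)
  else d

def parse_credentials_alt (output : String) : List (String × List (List (String × String))) :=
  let p1 := (PySem.Str.splitlines output).foldl pvStep1 ([], [])
  -- '*body, delim = group' is (group.dropLast, group.getLastD ""); every group is nonempty
  let creds := p1.1.map (fun g =>
    (g.dropLast.foldl pvStepUD PySem.Dict.empty).insert "password"
      (if PySem.Str.isIn ":" (g.getLastD "") then pvField (g.getLastD "") else "N/A"))
  if creds ≠ [] then [("credentials", creds.map (·.items))] else [("credentials", pvFallback)]

-- ===== PRECONDITION & SPEC =====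
-- Pre_ excludes exactly the inputs where A raises IndexError: a line containing
-- "Username" or "Domain" but no ":" makes line.split(":")[1] fail.
def Pre_parse_credentials (output : String) : Prop :=
  ∀ line ∈ PySem.Str.splitlines output,
    (PySem.Str.isIn "Username" line = true ∨ PySem.Str.isIn "Domain" line = true) →
      PySem.Str.isIn ":" line = true

instance (output : String) : Decidable (Pre_parse_credentials output) := by
  unfold Pre_parse_credentials; infer_instance

def pvWitness_parse_credentials : String :=
  "Username : alice\nDomain : corp\nNTLM : deadbeef\njunk"

def Spec_parse_credentials (output : String) (out : List (String × List (List (String × String)))) : Prop := out = parse_credentials_alt output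
instance (output : String) (out : List (String × List (List (String × String)))) : Decidable (Spec_parse_credentials output out) := by unfold Spec_parse_credentials; infer_instance

-- ===== CLAIM (what is proved, stated in full; the proofs are below) =====
def Claim_equal_parse_credentials : Prop := ∀ (output : String), Dom_parse_credentials output → Pre_parse_credentials output → Spec_parse_credentials output (parse_credentials output)

-- ===== LEMMAS AND PROOFS =====

-- how B builds a credential dict from one closed group
def pvMkDict (g : List String) : PySem.Dict String String :=
  (g.dropLast.foldl pvStepUD PySem.Dict.empty).insert "password"
    (if PySem.Str.isIn ":" (g.getLastD "") then pvField (g.getLastD "") else "N/A")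

-- A's step: close the dict on a delimiter line, else extend it with pvStepUD
theorem pvStepA_eq (ds : List (PySem.Dict String String)) (d : PySem.Dict String String)
    (line : String) :
    pvStepA (ds, d) line =
      if pvDelim line then
        (ds ++ [d.insert "password"
          (if PySem.Str.isIn ":" line then pvField line else "N/A")], PySem.Dict.empty)
      else (ds, pvStepUD d line) := by
  cases hU : PySem.Str.isIn "Username" line <;>
    cases hD : PySem.Str.isIn "Domain" line <;>
      cases hP : PySem.Str.isIn "Password" line <;>
        cases hN : PySem.Str.isIn "NTLM" line <;>
          simp only [pvStepA, pvStepUD, pvDelim, hU, hD, hP, hN] <;> simp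

-- the scan invariant: A's fold over the remaining lines, started from the state
-- B would be in (some groups closed, a partial group open), lands in the state
-- described by B's two passes
theorem pvScan_eq (lines : List String) :
    ∀ (gs : List (List String)) (cl : List String),
      lines.foldl pvStepA (gs.map pvMkDict, cl.foldl pvStepUD PySem.Dict.empty) =
        ((lines.foldl pvStep1 (gs, cl)).1.map pvMkDict,
         (lines.foldl pvStep1 (gs, cl)).2.foldl pvStepUD PySem.Dict.empty) := by
  induction lines with
  | nil => intro gs cl; rfl
  | cons line rest ih =>
    intro gs cl
    simp only [List.foldl_cons, pvStepA_eq, pvStep1]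
    by_cases h : pvDelim line = true
    · have hclose :
          (cl.foldl pvStepUD PySem.Dict.empty).insert "password"
            (if PySem.Str.isIn ":" line then pvField line else "N/A") =
          pvMkDict (cl ++ [line]) := by
        simp only [pvMkDict, List.dropLast_concat, List.getLastD_concat]
      simp only [if_pos h, hclose]
      have hmap : gs.map pvMkDict ++ [pvMkDict (cl ++ [line])]
          = (gs ++ [cl ++ [line]]).map pvMkDict := by simp
      rw [hmap]
      have := ih (gs ++ [cl ++ [line]]) []
      simpa using this
    · simp only [if_neg h]
      have hext : pvStepUD (cl.foldl pvStepUD PySem.Dict.empty) line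
          = (cl ++ [line]).foldl pvStepUD PySem.Dict.empty := by
        simp [List.foldl_append]
      rw [hext, ih gs (cl ++ [line])]

-- ===== VERDICT (by name: the statement is the Claim_ definition above) =====
theorem parse_credentials_spec : Claim_equal_parse_credentials := by
  intro output _ _
  unfold Spec_parse_credentials parse_credentials parse_credentials_alt
  have h := pvScan_eq (PySem.Str.splitlines output) [] []
  simp only [List.map_nil, List.foldl_nil] at h
  rw [h]
  rfl
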